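-- pv_equiv track=rewrite | github.com/chsssssss/coding-test | 프로그래머스/0/120843. 공 던지기/공 던지기.py | solution
-- ===== SOURCE A (Python) =====
-- def solution(numbers, k):
--     answer = 0
--     numbers = numbers * 500
--     cnt = 0
--     i = 0
--     while cnt < k:
--         answer = numbers[i]
--         i += 2
--         cnt += 1
--
--     return answer
-- ===== SOURCE B (Python) =====
-- def solution(numbers, k):
--     return numbers[2 * (k - 1) % len(numbers)]
-- ===== Notes on version B (the rewrite author's own statement) =====
-- stated objective: faster
-- what changed: Replaced the O(k) simulation loop over a 500x-repeated list by a single modular index numbers[2*(k-1) % len(numbers)].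
-- outside the precondition, e.g. on solution([1, 2, 3], 0): A returns 0, B returns 2
import Mathlib
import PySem

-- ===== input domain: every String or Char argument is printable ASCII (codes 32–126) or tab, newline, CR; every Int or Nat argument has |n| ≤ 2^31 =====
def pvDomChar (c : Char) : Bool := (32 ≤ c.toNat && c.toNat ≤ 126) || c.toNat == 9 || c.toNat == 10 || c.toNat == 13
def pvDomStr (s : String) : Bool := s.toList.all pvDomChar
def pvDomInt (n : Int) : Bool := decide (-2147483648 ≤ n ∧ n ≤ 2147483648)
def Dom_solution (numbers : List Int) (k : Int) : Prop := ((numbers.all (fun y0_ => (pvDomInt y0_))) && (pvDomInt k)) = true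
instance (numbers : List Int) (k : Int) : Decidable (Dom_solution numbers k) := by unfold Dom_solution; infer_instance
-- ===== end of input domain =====

-- B replaces A's O(k) simulation loop over a 500x-repeated list by one modular index (faster, asymptotic).

-- ===== PORT A =====
-- the while loop of A: state (answer, cnt, i), body answer = numbers[i]; i += 2; cnt += 1
def solutionLoop (nums : List Int) (k : Int) (answer cnt i : Int) : Int :=
  if cnt < k then
    solutionLoop nums k (PySem.List.pyGetD nums i 0) (cnt + 1) (i + 2)
  else answer
termination_by (k - cnt).toNat
decreasing_by omega

def solution (numbers : List Int) (k : Int) : Int :=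
  solutionLoop ((List.replicate 500 numbers).flatten) k 0 0 0

-- ===== PORT B =====
def solution_alt (numbers : List Int) (k : Int) : Int :=
  PySem.List.pyGetD numbers (PySem.Int.mod (2 * (k - 1)) (numbers.length : Int)) 0

-- ===== PRECONDITION & SPEC =====
-- Pre_ excludes (a) k so large that A's index 2*(k-1) runs past the 500-fold copy (A raises
-- IndexError there), and (b) k ≤ 0, the out-of-problem corner where A never enters its loop and
-- returns the accumulator's initial 0 while B indexes modularly — neither value is specified.
def Pre_solution (numbers : List Int) (k : Int) : Prop :=
  1 ≤ k ∧ 2 * (k - 1) < 500 * (numbers.length : Int)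
instance (numbers : List Int) (k : Int) : Decidable (Pre_solution numbers k) := by
  unfold Pre_solution; infer_instance
def pvWitness_solution : List Int × Int := ([1, 2, 3], 4)
def Spec_solution (numbers : List Int) (k : Int) (out : Int) : Prop := out = solution_alt numbers k
instance (numbers : List Int) (k : Int) (out : Int) : Decidable (Spec_solution numbers k out) := by unfold Spec_solution; infer_instance

-- ===== CLAIM (what is proved, stated in full; the proofs are below) =====
def Claim_equal_solution : Prop := ∀ (numbers : List Int) (k : Int), Dom_solution numbers k → Pre_solution numbers k → Spec_solution numbers k (solution numbers k)

-- ===== LEMMAS AND PROOFS =====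

-- A's loop returns the element read in its final iteration, at index i + 2*(k-cnt-1).
theorem solutionLoop_eq (nums : List Int) (k : Int) :
    ∀ (fuel : Nat) (a cnt i : Int), (k - cnt).toNat = fuel → cnt < k →
      solutionLoop nums k a cnt i = PySem.List.pyGetD nums (i + 2 * (k - cnt - 1)) 0 := by
  intro fuel
  induction fuel with
  | zero => intro a cnt i hf h; omega
  | succ n ih =>
    intro a cnt i hf h
    rw [solutionLoop, if_pos h]
    by_cases h2 : cnt + 1 < k
    · rw [ih _ (cnt + 1) (i + 2) (by omega) h2]
      ring_nf
    · -- last iteration: cnt + 1 = k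
      rw [solutionLoop, if_neg h2]
      have : i + 2 * (k - cnt - 1) = i := by omega
      rw [this]

-- indexing a flattened m-fold replication is indexing the original list modulo its length
theorem pyGetD_flatten_replicate (nums : List Int) (hne : 0 < nums.length) :
    ∀ (m : Nat) (j : Int), 0 ≤ j → j < (m : Int) * (nums.length : Int) →
      PySem.List.pyGetD ((List.replicate m nums).flatten) j 0
        = PySem.List.pyGetD nums (j % (nums.length : Int)) 0 := by
  intro m
  induction m with
  | zero => intro j h0 hub; omega
  | succ n ih =>
    intro j h0 hub
    have hrep : (List.replicate (n + 1) nums).flatten = nums ++ (List.replicate n nums).flatten := by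
      simp [List.replicate_succ]
    have hub' : j < (n : Int) * (nums.length : Int) + (nums.length : Int) := by
      push_cast at hub; nlinarith
    rw [hrep]
    by_cases hj : j < (nums.length : Int)
    · rw [PySem.List.pyGetD_eq_getElem _ _ (by omega)
        (by simp; omega)]
      rw [List.getElem_append_left (by omega)]
      rw [Int.emod_eq_of_lt h0 hj]
      rw [PySem.List.pyGetD_eq_getElem _ _ h0 hj]
    · have hlen : ((List.replicate n nums).flatten).length = n * nums.length := by
        simp
      rw [PySem.List.pyGetD_eq_getElem _ _ (by omega)
        (by simp only [List.length_append, hlen]; push_cast; linarith)]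
      rw [List.getElem_append_right (by omega)]
      have h1 : PySem.List.pyGetD ((List.replicate n nums).flatten) (j - (nums.length : Int)) 0
          = PySem.List.pyGetD nums ((j - (nums.length : Int)) % (nums.length : Int)) 0 := by
        apply ih _ (by omega) (by linarith)
      rw [PySem.List.pyGetD_eq_getElem _ _ (by omega) (by rw [hlen]; push_cast; linarith)] at h1
      have hsub : j.toNat - nums.length = (j - (nums.length : Int)).toNat := by omega
      simp only [hsub]
      exact h1.trans (by rw [Int.sub_emod_right])

theorem solution_spec : Claim_equal_solution := by
  intro numbers k _ hpre
  obtain ⟨hk, hub⟩ := hpre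
  have hne : 0 < numbers.length := by
    by_contra h
    have : numbers.length = 0 := by omega
    rw [this] at hub
    omega
  unfold Spec_solution solution solution_alt
  rw [solutionLoop_eq _ _ (k - 0).toNat 0 0 0 rfl (by omega)]
  have h0 : (0 : Int) + 2 * (k - 0 - 1) = 2 * (k - 1) := by ring
  rw [h0]
  rw [pyGetD_flatten_replicate numbers hne 500 (2 * (k - 1)) (by omega) (by push_cast; omega)]
  rw [PySem.Int.mod_eq_emod_of_pos (by exact_mod_cast hne)]
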